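-- pv_equiv track=rewrite | github.com/furrepanther/research-agent | src/filter.py | _check_term_proximity
-- ===== SOURCE A (Python) =====
-- def _check_term_proximity(content, groups, max_distance=3000):
--     """
--     Check if terms from different groups appear near each other in the text.
--
--     For papers to be relevant, terms from group 1 (e.g., "AI", "LLM") should
--     be within max_distance characters of terms from group 2 (e.g., "safety", "alignment").
--
--     This prevents matching papers where "LLM" appears at the top and "alignment"
--     appears at the bottom talking about completely different things (e.g., car alignment).
--
--     Args:
--         content: The full text to search (lowercase)
--         groups: List of term groups (AND of ORs)
--         max_distance: Maximum character distance between terms from different groups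
--
--     Returns:
--         True if terms are in proximity, False otherwise
--     """
--     if len(groups) < 2:
--         # If only one group, no proximity check needed
--         return True
--
--     # Find all positions of terms from each group
--     group_positions = []
--     for group in groups:
--         positions = []
--         for term in group:
--             term_lower = term.lower()
--             start = 0
--             while True:
--                 pos = content.find(term_lower, start)
--                 if pos == -1:
--                     break
--                 positions.append(pos)
--                 start = pos + 1
--         if positions:
--             group_positions.append(sorted(positions))
--         else:
--             # No term from this group found
--             return False
--
--     if len(group_positions) < 2:
--         # Need at least 2 groups to check proximity
--         return False
--
--     # Check if any term from group 1 is near any term from group 2 (and group 3, etc.)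
--     # We check pairwise proximity between consecutive groups
--     for i in range(len(group_positions) - 1):
--         group1_pos = group_positions[i]
--         group2_pos = group_positions[i + 1]
--
--         # Check if any position from group1 is within max_distance of any position from group2
--         proximity_found = False
--         for pos1 in group1_pos:
--             for pos2 in group2_pos:
--                 if abs(pos1 - pos2) <= max_distance:
--                     proximity_found = True
--                     break
--             if proximity_found:
--                 break
--
--         if not proximity_found:
--             return False
--
--     return True
-- ===== SOURCE B (Python) =====
-- def _check_term_proximity(content, groups, max_distance=3000):
--     """Streaming re-implementation: walk the groups once, keeping only the
--     previous group's sorted positions, and check each consecutive pair with a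
--     two-pointer merge over the two sorted position lists."""
--     if len(groups) < 2:
--         return True
--     prev = _sorted_positions(content, groups[0])
--     if not prev:
--         return False
--     for group in groups[1:]:
--         cur = _sorted_positions(content, group)
--         if not cur:
--             return False
--         if not _near(prev, cur, max_distance):
--             return False
--         prev = cur
--     return True
--
--
-- def _sorted_positions(content, group):
--     out = []
--     for term in group:
--         t = term.lower()
--         start = 0
--         while True:
--             p = content.find(t, start)
--             if p == -1:
--                 break
--             out.append(p)
--             start = p + 1
--     return sorted(out)
--
--
-- def _near(a, b, d):
--     # two-pointer over sorted position lists
--     i = j = 0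
--     while i < len(a) and j < len(b):
--         if abs(a[i] - b[j]) <= d:
--             return True
--         if a[i] < b[j]:
--             i += 1
--         else:
--             j += 1
--     return False
-- ===== Notes on version B (the rewrite author's own statement) =====
-- stated objective: alternative
-- what changed: A builds all groups' position lists first and then tests each consecutive pair with a nested any-of-any scan; B streams over the groups once, keeping only the previous group's sorted positions, and decides each pair with a two-pointer merge of the two sorted lists.
import Mathlib
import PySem

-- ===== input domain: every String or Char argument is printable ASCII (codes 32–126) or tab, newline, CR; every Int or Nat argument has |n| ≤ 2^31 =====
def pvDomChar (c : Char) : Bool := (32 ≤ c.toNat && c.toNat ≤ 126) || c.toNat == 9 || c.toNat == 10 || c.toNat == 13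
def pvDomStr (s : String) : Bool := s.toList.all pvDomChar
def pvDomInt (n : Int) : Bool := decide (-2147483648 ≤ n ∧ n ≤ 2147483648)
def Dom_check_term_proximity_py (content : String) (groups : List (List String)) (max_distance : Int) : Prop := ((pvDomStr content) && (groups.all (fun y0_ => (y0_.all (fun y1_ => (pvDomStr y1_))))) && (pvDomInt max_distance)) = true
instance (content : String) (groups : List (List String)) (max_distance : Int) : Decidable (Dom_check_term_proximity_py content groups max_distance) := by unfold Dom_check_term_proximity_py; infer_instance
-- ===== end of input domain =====

-- B replaces A's collect-everything-then-nested-scan with a single streaming pass over the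
-- groups whose consecutive-pair check is a two-pointer merge of the two sorted position
-- lists (objective: alternative algorithm, not measured faster; the position-finding
-- `content.find` loop is the same in both and is shared below).

-- ===== PORT A =====

-- the `while True: pos = content.find(t, start)` loop; fuel only makes it structurally
-- total (length+2 iterations always suffice: `start` strictly increases and stays ≤ len+1)
def pvFindLoop (s t : List Char) : Nat → Nat → List Int
  | _, 0 => []
  | start, fuel + 1 =>
    let pos := PySem.Chars.findFrom s t (start : Int)
    if pos = -1 then [] else pos :: pvFindLoop s t (pos.toNat + 1) fuel

-- `for term in group: term_lower = term.lower(); ... positions.append(pos)`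
def pvPositions (content : String) (group : List String) : List Int :=
  group.foldl
    (fun acc term =>
      acc ++ pvFindLoop content.toList (PySem.Chars.lower term.toList) 0 (content.toList.length + 2))
    []

-- A's first loop: build group_positions; early `return False` on an empty group = none
def pvCollect (content : String) : List (List String) → Option (List (List Int))
  | [] => some []
  | g :: gs =>
    let ps := pvPositions content g
    if ps = [] then none
    else
      match pvCollect content gs with
      | none => none
      | some l => some (PySem.List.sorted ps (fun x => x) :: l)

-- A's second loop over consecutive pairs: nested scan with break = any-of-any
def pvPairs (d : Int) : List (List Int) → Bool
  | a :: b :: rest =>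
    (a.any fun p1 => b.any fun p2 => decide (|p1 - p2| ≤ d)) && pvPairs d (b :: rest)
  | _ => true

def check_term_proximity_py (content : String) (groups : List (List String)) (max_distance : Int) : Bool :=
  if groups.length < 2 then true
  else
    match pvCollect content groups with
    | none => false
    | some gp => if gp.length < 2 then false else pvPairs max_distance gp

-- ===== PORT B =====

-- two-pointer merge over two sorted position lists (B's `_near`)
def pvTwoPtr (d : Int) : List Int → List Int → Bool
  | _, [] => false
  | [], _ :: _ => false
  | x :: xs, y :: ys =>
    if |x - y| ≤ d then true
    else if x < y then pvTwoPtr d xs (y :: ys) else pvTwoPtr d (x :: xs) ys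
  termination_by a b => a.length + b.length

-- B's `_sorted_positions`
def pvSortedPositions (content : String) (group : List String) : List Int :=
  PySem.List.sorted (pvPositions content group) (fun x => x)

-- B's streaming `for group in groups[1:]` loop carrying only the previous list
def pvLoopB (content : String) (d : Int) : List Int → List (List String) → Bool
  | _, [] => true
  | prev, g :: gs =>
    let cur := pvSortedPositions content g
    if cur = [] then false
    else if pvTwoPtr d prev cur then pvLoopB content d cur gs else false

def check_term_proximity_py_alt (content : String) (groups : List (List String)) (max_distance : Int) : Bool :=
  if groups.length < 2 then true
  else
    match groups with
    | [] => true
    | g :: gs =>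
      let p0 := pvSortedPositions content g
      if p0 = [] then false else pvLoopB content max_distance p0 gs

-- ===== PRECONDITION & SPEC =====
def Spec_check_term_proximity_py (content : String) (groups : List (List String)) (max_distance : Int) (out : Bool) : Prop := out = check_term_proximity_py_alt content groups max_distance
instance (content : String) (groups : List (List String)) (max_distance : Int) (out : Bool) : Decidable (Spec_check_term_proximity_py content groups max_distance out) := by unfold Spec_check_term_proximity_py; infer_instance

-- ===== CLAIM (what is proved, stated in full; the proofs are below) =====
def Claim_equal_check_term_proximity_py : Prop := ∀ (content : String) (groups : List (List String)) (max_distance : Int), Dom_check_term_proximity_py content groups max_distance → Spec_check_term_proximity_py content groups max_distance (check_term_proximity_py content groups max_distance)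

-- ===== LEMMAS AND PROOFS =====

-- two-pointer correctness: on sorted lists it equals A's nested any-scan
theorem pvTwoPtr_eq (d : Int) (a b : List Int)
    (ha : a.Pairwise (· ≤ ·)) (hb : b.Pairwise (· ≤ ·)) :
    pvTwoPtr d a b = a.any (fun x => b.any fun y => decide (|x - y| ≤ d)) := by
  fun_induction pvTwoPtr d a b with
  | case1 a => simp
  | case2 => simp
  | case3 x xs y ys h => simp [h]
  | case4 x xs y ys hgt hlt ih =>
    rw [List.pairwise_cons] at ha hb
    rw [abs_le] at hgt
    have hnone : (y :: ys).any (fun y' => decide (|x - y'| ≤ d)) = false := by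
      simp only [List.any_eq_false, decide_eq_true_eq, abs_le]
      intro y' hy'
      have hyy : y ≤ y' := by
        rcases List.mem_cons.mp hy' with rfl | h'
        · exact le_refl _
        · exact hb.1 _ h'
      omega
    rw [ih ha.2 (List.pairwise_cons.mpr hb), List.any_cons, hnone, Bool.false_or]
  | case5 x xs y ys hgt hlt ih =>
    rw [List.pairwise_cons] at hb
    rw [abs_le] at hgt
    rw [ih ha hb.2]
    refine PySem.List.any_congr_mem ?_
    intro x' hx'
    have hxx : x ≤ x' := by
      rcases List.mem_cons.mp hx' with rfl | h'
      · exact le_refl _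
      · exact (List.pairwise_cons.mp ha).1 _ h'
    have hfalse : decide (|x' - y| ≤ d) = false :=
      decide_eq_false (by rw [abs_le]; omega)
    rw [List.any_cons, hfalse, Bool.false_or]

theorem pvCollect_length (content : String) :
    ∀ gs l, pvCollect content gs = some l → l.length = gs.length := by
  intro gs
  induction gs with
  | nil => intro l h; simp [pvCollect] at h; simp [← h]
  | cons g gs ih =>
    intro l h
    simp only [pvCollect] at h
    split at h
    · exact absurd h (by simp)
    · split at h
      · exact absurd h (by simp)
      · rename_i l' hl'
        simp only [Option.some.injEq] at h
        simp [← h, ih l' hl']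

theorem pvSorted_pairwise (content : String) (g : List String) :
    (pvSortedPositions content g).Pairwise (· ≤ ·) := by
  simpa using PySem.List.sorted_pairwise (pvPositions content g) (fun x => x)

theorem pvLoopB_eq (content : String) (d : Int) :
    ∀ (gs : List (List String)) (prev : List Int), prev.Pairwise (· ≤ ·) →
      pvLoopB content d prev gs =
        (match pvCollect content gs with
         | none => false
         | some l => pvPairs d (prev :: l)) := by
  intro gs
  induction gs with
  | nil => intro prev _; simp [pvLoopB, pvCollect, pvPairs]
  | cons g gs ih =>
    intro prev hp
    rw [pvLoopB]
    by_cases hemp : pvPositions content g = []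
    · have hcur : pvSortedPositions content g = [] := by
        simp [pvSortedPositions, PySem.List.sorted_eq_nil_iff, hemp]
      rw [if_pos hcur]
      simp [pvCollect, hemp]
    · have hcur : pvSortedPositions content g ≠ [] := by
        simp [pvSortedPositions, PySem.List.sorted_eq_nil_iff, hemp]
      rw [if_neg hcur,
        pvTwoPtr_eq d prev _ hp (pvSorted_pairwise content g),
        ih _ (pvSorted_pairwise content g)]
      simp only [pvCollect, if_neg hemp]
      cases hc : pvCollect content gs with
      | none =>
        cases h : (prev.any fun p1 =>
            (pvSortedPositions content g).any fun p2 => decide (|p1 - p2| ≤ d)) <;> simp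
      | some l =>
        show _ = pvPairs d (prev :: pvSortedPositions content g :: l)
        rw [pvPairs]
        cases h : (prev.any fun p1 =>
            (pvSortedPositions content g).any fun p2 => decide (|p1 - p2| ≤ d)) <;> simp

-- ===== VERDICT (by name: the statement is the Claim_ definition above) =====
theorem check_term_proximity_py_spec : Claim_equal_check_term_proximity_py := by
  intro content groups d _hdom
  unfold Spec_check_term_proximity_py check_term_proximity_py check_term_proximity_py_alt
  by_cases hlen : groups.length < 2
  · simp [hlen]
  · simp only [hlen, if_false]
    match groups, hlen with
    | g :: gs, hlen =>
      by_cases hemp : pvPositions content g = []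
      · have hcur : pvSortedPositions content g = [] := by
          simp [pvSortedPositions, PySem.List.sorted_eq_nil_iff, hemp]
        simp [pvCollect, hemp, hcur]
      · have hcur : pvSortedPositions content g ≠ [] := by
          simp [pvSortedPositions, PySem.List.sorted_eq_nil_iff, hemp]
        simp only [pvCollect, if_neg hemp, if_neg hcur]
        rw [pvLoopB_eq content d gs (pvSortedPositions content g) (pvSorted_pairwise content g)]
        cases hc : pvCollect content gs with
        | none => simp
        | some l =>
          have hll : l.length = gs.length := pvCollect_length content gs l hc
          have hge : ¬ ((PySem.List.sorted (pvPositions content g) (fun x => x)) :: l).length < 2 := by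
            simp only [List.length_cons, hll]
            simp only [List.length_cons] at hlen
            omega
          simp only [if_neg hge]
          rfl
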